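-- pv_equiv track=rewrite | github.com/akum32o/ncsl-ai-energy-watch | ncsl_ai_energy_watch.py | group_by_state
-- ===== SOURCE A (Python) =====
-- from typing import List, Dict, Set
--
-- NE_PLUS_NY = [
--     "Connecticut",
--     "Maine",
--     "Massachusetts",
--     "New Hampshire",
--     "Rhode Island",
--     "Vermont",
--     "New York",
-- ]
--
-- def group_by_state(new_rows: List[Dict]):
--     """Split new rows into {NE+NY states} and {other states}, each mapping state -> list[rows]."""
--     top = {s: [] for s in NE_PLUS_NY}
--     others: Dict[str, List[Dict]] = {}
--
--     for r in new_rows: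
--         state = r["state"]
--         if state in top:
--             top[state].append(r)
--         else:
--             others.setdefault(state, []).append(r)
--
--     # Drop empty states from "top"
--     top = {s: bills for s, bills in top.items() if bills}
--     return top, others
-- ===== SOURCE B (Python) =====
-- NE_PLUS_NY = [
--     "Connecticut",
--     "Maine",
--     "Massachusetts",
--     "New Hampshire",
--     "Rhode Island",
--     "Vermont",
--     "New York",
-- ]
--
-- def group_by_state(new_rows):
--     """Split new rows into {NE+NY states} and {other states}, each mapping state -> list[rows]."""
--     states = [r["state"] for r in new_rows]
--
--     def rows_for(s):
--         return [r for r in new_rows if r["state"] == s]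
--
--     top = {s: rows_for(s) for s in NE_PLUS_NY if s in states}
--
--     ne = set(NE_PLUS_NY)
--     others_keys = []
--     for st in states:
--         if st not in ne and st not in others_keys:
--             others_keys.append(st)
--     others = {s: rows_for(s) for s in others_keys}
--     return top, others
-- ===== Notes on version B (the rewrite author's own statement) =====
-- stated objective: alternative
-- what changed: Replaces the single-pass dict-accumulation (pre-seeded top dict, setdefault on others, post-filter of empty states) by a declarative two-phase strategy: compute the key lists first (NE states that occur, then first-occurrence order of the other states) and build each group by a per-state filter pass.
import Mathlib
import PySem

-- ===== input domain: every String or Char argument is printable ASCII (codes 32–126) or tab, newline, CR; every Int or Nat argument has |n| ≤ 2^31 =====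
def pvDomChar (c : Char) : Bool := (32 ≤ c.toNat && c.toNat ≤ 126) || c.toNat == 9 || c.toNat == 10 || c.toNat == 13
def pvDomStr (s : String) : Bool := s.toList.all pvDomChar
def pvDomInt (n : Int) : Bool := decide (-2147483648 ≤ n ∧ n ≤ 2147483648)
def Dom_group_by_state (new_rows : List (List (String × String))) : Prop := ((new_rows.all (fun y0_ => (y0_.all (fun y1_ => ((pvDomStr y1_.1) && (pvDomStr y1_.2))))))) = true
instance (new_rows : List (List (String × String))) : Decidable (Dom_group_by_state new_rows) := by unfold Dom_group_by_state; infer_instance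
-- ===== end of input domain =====

-- B groups per state by a declarative two-phase strategy (key lists first, then one filter pass per state)
-- instead of A's single-pass dict accumulation; same return value, no speed claim.

def pvNE : List String :=
  ["Connecticut", "Maine", "Massachusetts", "New Hampshire", "Rhode Island", "Vermont", "New York"]

-- r["state"]; Pre_ guarantees the key is present, so the "" default is never reached inside Pre_
def pvStateOf (r : List (String × String)) : String :=
  ((PySem.Dict.mk r).get? "state").getD ""

-- ===== PORT A =====
def group_by_state (new_rows : List (List (String × String))) : (List (String × List (List (String × String)))) × (List (String × List (List (String × String)))) :=
  -- top = {s: [] for s in NE_PLUS_NY}; others = {}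
  let top0 : PySem.Dict String (List (List (String × String))) :=
    pvNE.foldl (fun d s => d.insert s []) PySem.Dict.empty
  -- the loop; setdefault(state, []).append(r) is modify state [] (· ++ [r])
  let p := new_rows.foldl
    (fun (acc : PySem.Dict String (List (List (String × String))) × PySem.Dict String (List (List (String × String)))) r =>
      let state := pvStateOf r
      if acc.1.contains state then
        (acc.1.modify state [] (fun bs => bs ++ [r]), acc.2)
      else
        (acc.1, acc.2.modify state [] (fun bs => bs ++ [r])))
    (top0, PySem.Dict.empty)
  -- top = {s: bills for s, bills in top.items() if bills}
  (p.1.items.filter (fun q => !q.2.isEmpty), p.2.items)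

-- ===== PORT B =====
def group_by_state_alt (new_rows : List (List (String × String))) : (List (String × List (List (String × String)))) × (List (String × List (List (String × String)))) :=
  let states := new_rows.map pvStateOf
  let rowsFor := fun (s : String) => new_rows.filter (fun r => pvStateOf r == s)
  let top := (pvNE.filter (fun s => states.contains s)).map (fun s => (s, rowsFor s))
  let ne := PySem.Set.ofList pvNE
  let othersKeys := states.foldl
    (fun (acc : List String) st =>
      if !(PySem.Set.contains ne st) && !(acc.contains st) then acc ++ [st] else acc) []
  let others := othersKeys.map (fun s => (s, rowsFor s))
  (top, others)

-- ===== PRECONDITION & SPEC =====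
-- Pre_ excludes exactly the rows without a "state" key, on which Python A raises KeyError.
def Pre_group_by_state (new_rows : List (List (String × String))) : Prop :=
  ∀ r ∈ new_rows, ((PySem.Dict.mk r).get? "state").isSome = true
instance (new_rows : List (List (String × String))) : Decidable (Pre_group_by_state new_rows) := by unfold Pre_group_by_state; infer_instance
def pvWitness_group_by_state : (List (List (String × String))) :=
  [[("state", "New York"), ("bill", "S1")], [("state", "Texas")], [("state", "New York")]]

def Spec_group_by_state (new_rows : List (List (String × String))) (out : (List (String × List (List (String × String)))) × (List (String × List (List (String × String))))) : Prop := out = group_by_state_alt new_rows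
instance (new_rows : List (List (String × String))) (out : (List (String × List (List (String × String)))) × (List (String × List (List (String × String))))) : Decidable (Spec_group_by_state new_rows out) := by unfold Spec_group_by_state; exact instDecidableEqProd out (group_by_state_alt new_rows)

-- ===== CLAIM (what is proved, stated in full; the proofs are below) =====
def Claim_equal_group_by_state : Prop := ∀ (new_rows : List (List (String × String))), Dom_group_by_state new_rows → Pre_group_by_state new_rows → Spec_group_by_state new_rows (group_by_state new_rows)

-- ===== LEMMAS AND PROOFS =====

-- "is this row an NE+NY row"
def pvC (r : List (String × String)) : Bool := pvNE.contains (pvStateOf r)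

-- a conditional fold is a fold over the filtered list
theorem pv_foldl_if {A B : Type} (c : B → Bool) (g : A → B → A) (l : List B) (a : A) :
    l.foldl (fun d r => if c r then g d r else d) a = (l.filter c).foldl g a := by
  induction l generalizing a with
  | nil => rfl
  | cons x xs ih => by_cases h : c x <;> simp [h, ih]

theorem pv_foldl_if_not {A B : Type} (c : B → Bool) (g : A → B → A) (l : List B) (a : A) :
    l.foldl (fun d r => if c r then d else g d r) a = (l.filter (fun r => !c r)).foldl g a := by
  induction l generalizing a with
  | nil => rfl
  | cons x xs ih => by_cases h : c x <;> simp [h, ih]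

-- A's loop with the pair state splits into two independent folds, given that top's key set stays pvNE
theorem pv_decouple (l : List (List (String × String)))
    (top others : PySem.Dict String (List (List (String × String))))
    (h : ∀ s, top.contains s = pvNE.contains s) :
    l.foldl (fun acc r =>
        let state := pvStateOf r
        if acc.1.contains state then (acc.1.modify state [] (fun bs => bs ++ [r]), acc.2)
        else (acc.1, acc.2.modify state [] (fun bs => bs ++ [r]))) (top, others)
    = (l.foldl (fun d r => if pvNE.contains (pvStateOf r) then d.modify (pvStateOf r) [] (fun bs => bs ++ [r]) else d) top,
       l.foldl (fun d r => if pvNE.contains (pvStateOf r) then d else d.modify (pvStateOf r) [] (fun bs => bs ++ [r])) others) := by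
  induction l generalizing top others with
  | nil => rfl
  | cons r rs ih =>
    simp only [List.foldl_cons, h (pvStateOf r)]
    by_cases hc : pvNE.contains (pvStateOf r)
    · simp only [hc, if_true]
      exact ih _ _ (fun s => by
        rw [PySem.Dict.contains_modify, h s]
        cases hbe : (s == pvStateOf r)
        · simp
        · have hs : s = pvStateOf r := by simpa using hbe
          simp only [hs]
          simp
          simpa using hc)
    · simp only [hc]
      exact ih _ _ h

-- the grouping fold characterised by getD
theorem pv_getD_group (l : List (List (String × String)))
    (d : PySem.Dict String (List (List (String × String)))) (k : String) :
    (l.foldl (fun d r => d.modify (pvStateOf r) [] (fun bs => bs ++ [r])) d).getD k []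
      = d.getD k [] ++ l.filter (fun r => pvStateOf r == k) := by
  have h1 : l.foldl (fun d r => d.modify (pvStateOf r) [] (fun bs => bs ++ [r])) d
      = (l.map (fun r => (pvStateOf r, r))).foldl (fun d p => d.modify p.1 [] (fun bs => bs ++ [p.2])) d := by
    rw [List.foldl_map]
  rw [h1, PySem.Dict.getD_foldl_modify_append, List.filter_map]
  simp [List.map_map, Function.comp_def]

theorem pv_getD_constfold (ks : List String)
    (d : PySem.Dict String (List (List (String × String)))) (x : String)
    (h : d.getD x [] = []) :
    (ks.foldl (fun d s => d.insert s []) d).getD x [] = [] := by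
  induction ks generalizing d with
  | nil => exact h
  | cons k ks ih =>
    exact ih _ (by rw [PySem.Dict.getD_insert]; split <;> simp [h])


theorem pv_elem (l : List String) (s : String) (h : s ∈ l) : l.contains s = true :=
  List.elem_eq_true_of_mem h

-- inside pvNE the NE-test on a matching row is redundant
theorem pv_filter_top (l : List (List (String × String))) (s : String) (hs : s ∈ pvNE) :
    l.filter (fun r => (pvStateOf r == s) && pvNE.contains (pvStateOf r))
      = l.filter (fun r => pvStateOf r == s) := by
  apply List.filter_congr
  intro r _
  cases hbe : (pvStateOf r == s)
  · simp
  · have h1 : pvStateOf r = s := by simpa using hbe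
    simp only [h1, pv_elem _ _ hs, Bool.and_true]

-- outside pvNE the negated NE-test on a matching row is redundant
theorem pv_filter_others (l : List (List (String × String))) (s : String)
    (hs : pvNE.contains s = false) :
    l.filter (fun r => (pvStateOf r == s) && !pvNE.contains (pvStateOf r))
      = l.filter (fun r => pvStateOf r == s) := by
  apply List.filter_congr
  intro r _
  cases hbe : (pvStateOf r == s)
  · simp
  · have h1 : pvStateOf r = s := by simpa using hbe
    simp only [h1, hs, Bool.not_false, Bool.and_true]

-- a group is non-empty iff its state occurs
theorem pv_nonempty_iff_contains (l : List (List (String × String))) (s : String) :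
    (!(l.filter (fun r => pvStateOf r == s)).isEmpty) = (l.map pvStateOf).contains s := by
  rw [Bool.eq_iff_iff]
  simp

-- B's seen-keys loop is ordered dedup of the non-NE states
theorem pv_otherskeys (sts : List String) (a : List String) :
    sts.foldl (fun acc st => if !pvNE.contains st && !acc.contains st then acc ++ [st] else acc) a
      = PySem.Set.update a (sts.filter (fun st => !pvNE.contains st)) := by
  induction sts generalizing a with
  | nil => rfl
  | cons st sts ih =>
    by_cases h : pvNE.contains st
    · have hm : st ∈ pvNE := by simpa using h
      have hfc : List.filter (fun st => !pvNE.contains st) (st :: sts)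
          = List.filter (fun st => !pvNE.contains st) sts := by simp [hm]
      rw [List.foldl_cons, hfc]
      rw [show (if (!pvNE.contains st && !(List.contains a st)) = true then a ++ [st] else a) = a from by
        simp
        exact fun hn => absurd hm hn]
      exact ih a
    · have hm : st ∉ pvNE := by simpa using h
      have hfc : List.filter (fun st => !pvNE.contains st) (st :: sts)
          = st :: List.filter (fun st => !pvNE.contains st) sts := by simp [hm]
      have hstep : (if (!pvNE.contains st && !(List.contains a st)) = true then a ++ [st] else a)
          = PySem.Set.add a st := by
        by_cases h2 : st ∈ a
        · rw [PySem.Set.add_of_mem h2]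
          simp
          exact fun _ => h2
        · rw [PySem.Set.add_of_not_mem h2]
          simp
          exact ⟨hm, h2⟩
      rw [List.foldl_cons, hstep, ih, hfc, PySem.Set.update_cons]

theorem pv_main (l : List (List (String × String))) :
    group_by_state l = group_by_state_alt l := by
  have hnodupNE : pvNE.Nodup := by decide
  have hkeys0 : (pvNE.foldl (fun d s => d.insert s ([] : List (List (String × String)))) PySem.Dict.empty).keys = pvNE := by decide
  have hcont0 : ∀ s : String, (pvNE.foldl (fun d s => d.insert s ([] : List (List (String × String)))) PySem.Dict.empty).contains s = pvNE.contains s := by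
    intro s
    rw [PySem.Dict.contains_eq_decide_mem_keys, hkeys0]
    simp
  unfold group_by_state group_by_state_alt
  dsimp only
  rw [pv_decouple l _ _ hcont0, pv_foldl_if, pv_foldl_if_not]
  have hof : PySem.Set.ofList pvNE = pvNE := by decide
  have hgetT : ∀ s : String,
      ((l.filter (fun r => pvNE.contains (pvStateOf r))).foldl
          (fun d r => d.modify (pvStateOf r) [] fun bs => bs ++ [r])
          (pvNE.foldl (fun d s => d.insert s []) PySem.Dict.empty)).getD s []
        = l.filter (fun r => (pvStateOf r == s) && pvNE.contains (pvStateOf r)) := by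
    intro s
    rw [pv_getD_group, pv_getD_constfold _ _ _ (by rfl), List.filter_filter]
    simp
  have hkeysT :
      ((l.filter (fun r => pvNE.contains (pvStateOf r))).foldl
          (fun d r => d.modify (pvStateOf r) [] fun bs => bs ++ [r])
          (pvNE.foldl (fun d s => d.insert s []) PySem.Dict.empty)).keys = pvNE := by
    rw [PySem.Dict.keys_foldl_modify_key, hkeys0, PySem.Set.update_eq_append_filter]
    simp only [PySem.Set.contains_eq_listContains]
    have : ∀ y ∈ PySem.Set.ofList ((l.filter (fun r => pvNE.contains (pvStateOf r))).map pvStateOf),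
        ¬ (!pvNE.contains y) = true := by
      intro y hy
      have hy2 := (PySem.Set.mem_ofList _ _).mp hy
      simp only [List.mem_map, List.mem_filter] at hy2
      obtain ⟨r, ⟨_, hr⟩, rfl⟩ := hy2
      simpa using hr
    rw [List.filter_eq_nil_iff.mpr this, List.append_nil]
  have hgetO : ∀ s : String,
      ((l.filter (fun r => !pvNE.contains (pvStateOf r))).foldl
          (fun d r => d.modify (pvStateOf r) [] fun bs => bs ++ [r]) PySem.Dict.empty).getD s []
        = l.filter (fun r => (pvStateOf r == s) && !pvNE.contains (pvStateOf r)) := by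
    intro s
    rw [pv_getD_group, List.filter_filter]
    simp [PySem.Dict.getD_empty]
  have hkeysO :
      ((l.filter (fun r => !pvNE.contains (pvStateOf r))).foldl
          (fun d r => d.modify (pvStateOf r) [] fun bs => bs ++ [r]) PySem.Dict.empty).keys
        = PySem.Set.ofList ((l.filter (fun r => !pvNE.contains (pvStateOf r))).map pvStateOf) := by
    rw [PySem.Dict.keys_foldl_modify_key, PySem.Dict.keys_empty, PySem.Set.update_nil_left]
  refine Prod.ext ?_ ?_
  · -- top component
    dsimp only
    rw [PySem.Dict.items_eq_map_keys _ (by rw [hkeysT]; exact hnodupNE) [], hkeysT]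
    rw [List.map_congr_left (fun s _ => by rw [hgetT s])]
    rw [List.filter_map]
    rw [List.filter_congr (fun s hs => by
      show (!(l.filter (fun r => (pvStateOf r == s) && pvNE.contains (pvStateOf r))).isEmpty) = _
      rw [pv_filter_top l s hs, pv_nonempty_iff_contains])]
    apply List.map_congr_left
    intro s hs
    rw [pv_filter_top l s (List.mem_of_mem_filter hs)]
  · -- others component
    dsimp only
    rw [PySem.Dict.items_eq_map_keys _ (by rw [hkeysO]; exact PySem.Set.nodup_ofList _) [], hkeysO]
    have hkeq : (List.map pvStateOf l).foldl
        (fun acc st => if !(PySem.Set.ofList pvNE).contains st && !acc.contains st then acc ++ [st] else acc) []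
        = PySem.Set.ofList ((l.filter (fun r => !pvNE.contains (pvStateOf r))).map pvStateOf) := by
      rw [hof]
      simp only [PySem.Set.contains_eq_listContains]
      refine Eq.trans (pv_otherskeys _ _) ?_
      rw [PySem.Set.update_nil_left, List.filter_map]
      simp [Function.comp_def]
    rw [hkeq]
    apply List.map_congr_left
    intro s hs
    have hs2 := (PySem.Set.mem_ofList _ _).mp hs
    simp only [List.mem_map, List.mem_filter] at hs2
    obtain ⟨r, ⟨_, hr⟩, rfl⟩ := hs2
    rw [hgetO, pv_filter_others l _ (by simpa using hr)]

-- ===== VERDICT (by name: the statement is the Claim_ definition above) =====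
theorem group_by_state_spec : Claim_equal_group_by_state := by
  intro new_rows _ _
  unfold Spec_group_by_state
  exact (pv_main new_rows).symm ▸ rfl
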